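-- pv_equiv track=rewrite | github.com/Arsen1302/Code-copy-detector | TestData/solutions/problem_1078_4.py | solution_1078_4
-- ===== SOURCE A (Python) =====
-- def solution_1078_4(grid):
--     m, n = len(grid), len(grid[0])
--
--     max_ = [[0]*n for _ in range(m)]
--     min_ = [[0]*n for _ in range(m)]
--
--     max_[0][0] = min_[0][0] = grid[0][0]
--
--     for i in range(1,m):
--         max_[i][0] = grid[i][0]*max_[i-1][0]
--         min_[i][0] = grid[i][0]*min_[i-1][0]
--
--     for j in range(1,n):
--         max_[0][j] = grid[0][j]*max_[0][j-1]
--         min_[0][j] = grid[0][j]*min_[0][j-1]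
--
--     for i in range(1,m):
--         for j in range(1,n):
--             if grid[i][j] > 0:
--                 max_[i][j] = max(max_[i-1][j],max_[i][j-1])*grid[i][j]
--                 min_[i][j] = min(min_[i-1][j],min_[i][j-1])*grid[i][j]
--             else:
--                 max_[i][j] = min(min_[i-1][j],min_[i][j-1])*grid[i][j]
--                 min_[i][j] = max(max_[i-1][j],max_[i][j-1])*grid[i][j]
--
--     return max_[-1][-1]%(10**9+7) if max_[-1][-1] >= 0 else -1
-- ===== SOURCE B (Python) =====
-- def solution_1078_4(grid):
--     # Wavefront DP: sweep anti-diagonals d = i + j, keeping only the previous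
--     # diagonal as a dict {column j: (max product, min product) to cell (d-j, j)}.
--     m, n = len(grid), len(grid[0])
--     prev = {}
--     for d in range(m + n - 1):
--         cur = {}
--         for j in range(max(0, d - m + 1), min(d, n - 1) + 1):
--             g = grid[d - j][j]
--             ps = [g * p for k in (j - 1, j) if k in prev for p in prev[k]]
--             cur[j] = (max(ps), min(ps)) if ps else (g, g)
--         prev = cur
--     mx = prev[n - 1][0]
--     return mx % (10**9 + 7) if mx >= 0 else -1
-- ===== Notes on version B (the rewrite author's own statement) =====
-- stated objective: alternative
-- what changed: Replaces A's row-major fill of two full m*n tables (corner, first-column, first-row loops plus a sign-case branch per interior cell) by a wavefront sweep over anti-diagonals d=i+j that keeps only the previous diagonal as a dict {column: (max,min)} and updates every cell, boundary or interior, by one uniform max/min over the candidate products from its two wavefront predecessors.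
import Mathlib
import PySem

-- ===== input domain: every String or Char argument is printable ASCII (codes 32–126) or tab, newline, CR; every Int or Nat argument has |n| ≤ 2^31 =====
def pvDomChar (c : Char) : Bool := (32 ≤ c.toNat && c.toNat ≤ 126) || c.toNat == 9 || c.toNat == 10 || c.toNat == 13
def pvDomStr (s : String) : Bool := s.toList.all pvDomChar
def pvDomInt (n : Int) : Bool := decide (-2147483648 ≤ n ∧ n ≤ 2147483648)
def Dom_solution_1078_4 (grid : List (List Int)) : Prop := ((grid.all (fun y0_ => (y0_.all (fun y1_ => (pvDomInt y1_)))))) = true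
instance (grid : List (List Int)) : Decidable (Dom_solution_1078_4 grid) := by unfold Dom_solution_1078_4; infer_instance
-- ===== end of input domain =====

-- B replaces A's row-major fill of two full m×n tables (three loops plus a sign-case branch) by a
-- wavefront sweep over anti-diagonals d = i + j that keeps only the previous diagonal as a dict
-- {column : (max, min)} with a uniform candidate-product rule; objective: simpler (same O(m·n) time).

-- ===== PORT A =====
-- t[i][j] read (Python raises when out of range; under Pre_ every read A makes is in range)
def get2 (t : List (List Int)) (i j : Nat) : Int := (t.getD i []).getD j 0
-- t[i][j] = v in-place write
def set2 (t : List (List Int)) (i j : Nat) (v : Int) : List (List Int) :=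
  t.set i ((t.getD i []).set j v)

-- body of `for i in range(1,m)` (first column); the pair is the (max_, min_) table pair
def stepCol (grid : List (List Int)) (s : List (List Int) × List (List Int)) (i : Nat) :
    List (List Int) × List (List Int) :=
  (set2 s.1 i 0 (get2 grid i 0 * get2 s.1 (i - 1) 0),
   set2 s.2 i 0 (get2 grid i 0 * get2 s.2 (i - 1) 0))

-- body of `for j in range(1,n)` (first row)
def stepRow (grid : List (List Int)) (s : List (List Int) × List (List Int)) (j : Nat) :
    List (List Int) × List (List Int) :=
  (set2 s.1 0 j (get2 grid 0 j * get2 s.1 0 (j - 1)),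
   set2 s.2 0 j (get2 grid 0 j * get2 s.2 0 (j - 1)))

-- body of the inner `for j in range(1,n)` of the nested loops, with A's sign branch
def stepInner (grid : List (List Int)) (i : Nat) (s : List (List Int) × List (List Int))
    (j : Nat) : List (List Int) × List (List Int) :=
  if get2 grid i j > 0 then
    (set2 s.1 i j (max (get2 s.1 (i - 1) j) (get2 s.1 i (j - 1)) * get2 grid i j),
     set2 s.2 i j (min (get2 s.2 (i - 1) j) (get2 s.2 i (j - 1)) * get2 grid i j))
  else
    (set2 s.1 i j (min (get2 s.2 (i - 1) j) (get2 s.2 i (j - 1)) * get2 grid i j),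
     set2 s.2 i j (max (get2 s.1 (i - 1) j) (get2 s.1 i (j - 1)) * get2 grid i j))

-- body of the outer `for i in range(1,m)`
def stepOuter (grid : List (List Int)) (s : List (List Int) × List (List Int)) (i : Nat) :
    List (List Int) × List (List Int) :=
  (List.range' 1 ((grid.getD 0 []).length - 1)).foldl (stepInner grid i) s

def solution_1078_4 (grid : List (List Int)) : Int :=
  let m := grid.length
  let n := (grid.getD 0 []).length
  -- max_ = [[0]*n for _ in range(m)]; min_ likewise
  let z := List.replicate m (List.replicate n (0 : Int))
  -- max_[0][0] = min_[0][0] = grid[0][0]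
  let s0 := (set2 z 0 0 (get2 grid 0 0), set2 z 0 0 (get2 grid 0 0))
  let s1 := (List.range' 1 (m - 1)).foldl (stepCol grid) s0
  let s2 := (List.range' 1 (n - 1)).foldl (stepRow grid) s1
  let s3 := (List.range' 1 (m - 1)).foldl (stepOuter grid) s2
  -- max_[-1][-1]
  let last := ((PySem.List.pyGet? s3.1 (-1)).getD []) |> fun r => (PySem.List.pyGet? r (-1)).getD 0
  if last ≥ 0 then PySem.Int.mod last (10 ^ 9 + 7) else -1

-- ===== PORT B =====
-- body of `for j in range(...)`: cur[j] = (max(ps), min(ps)) if ps else (g, g)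
def bCell (grid : List (List Int)) (prev : PySem.Dict Int (Int × Int)) (d : Nat)
    (cur : PySem.Dict Int (Int × Int)) (j : Nat) : PySem.Dict Int (Int × Int) :=
  let g := get2 grid (d - j) j
  -- ps = [g * p  for k in (j - 1, j)  if k in prev  for p in prev[k]]
  let ps := [(j : Int) - 1, (j : Int)].flatMap (fun k =>
    match PySem.Dict.get? prev k with
    | some p => [g * p.1, g * p.2]
    | none => [])
  PySem.Dict.insert cur (j : Int)
    (if ps.isEmpty then (g, g)
     else ((PySem.List.max? ps (fun y => y)).getD 0, (PySem.List.min? ps (fun y => y)).getD 0))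

-- body of `for d in range(m + n - 1)`: rebuild the rolling diagonal dict
-- (range(max(0, d - m + 1), min(d, n - 1) + 1) rendered with Nat truncated subtraction)
def bDiag (grid : List (List Int)) (m n : Nat) (prev : PySem.Dict Int (Int × Int)) (d : Nat) :
    PySem.Dict Int (Int × Int) :=
  (List.range' (d + 1 - m) (min d (n - 1) + 1 - (d + 1 - m))).foldl (bCell grid prev d)
    PySem.Dict.empty

def solution_1078_4_alt (grid : List (List Int)) : Int :=
  let m := grid.length
  let n := (grid.getD 0 []).length
  let prev := (List.range (m + n - 1)).foldl (bDiag grid m n) PySem.Dict.empty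
  let mx := ((PySem.Dict.get? prev ((n : Int) - 1)).getD (0, 0)).1
  if mx ≥ 0 then PySem.Int.mod mx (10 ^ 9 + 7) else -1

-- ===== PRECONDITION & SPEC =====
-- Pre_ excludes exactly the inputs where the Python A raises IndexError: the empty grid,
-- an empty first row, and grids in which some row is shorter than the first row.
def Pre_solution_1078_4 (grid : List (List Int)) : Prop :=
  grid ≠ [] ∧ (grid.getD 0 []).length ≠ 0 ∧
  ∀ row ∈ grid, (grid.getD 0 []).length ≤ row.length
instance (grid : List (List Int)) : Decidable (Pre_solution_1078_4 grid) := by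
  unfold Pre_solution_1078_4; infer_instance

def pvWitness_solution_1078_4 : List (List Int) := [[1, -2], [3, 4]]

def Spec_solution_1078_4 (grid : List (List Int)) (out : Int) : Prop := out = solution_1078_4_alt grid
instance (grid : List (List Int)) (out : Int) : Decidable (Spec_solution_1078_4 grid out) := by unfold Spec_solution_1078_4; infer_instance

-- ===== CLAIM (what is proved, stated in full; the proofs are below) =====
def Claim_equal_solution_1078_4 : Prop := ∀ (grid : List (List Int)), Dom_solution_1078_4 grid → Pre_solution_1078_4 grid → Spec_solution_1078_4 grid (solution_1078_4 grid)

-- ===== LEMMAS AND PROOFS =====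

-- the mathematical DP recurrence both programs compute: (max product, min product) to cell (i,j)
def MN (grid : List (List Int)) : Nat → Nat → Int × Int
  | 0, 0 => (get2 grid 0 0, get2 grid 0 0)
  | i + 1, 0 => (get2 grid (i + 1) 0 * (MN grid i 0).1, get2 grid (i + 1) 0 * (MN grid i 0).2)
  | 0, j + 1 => (get2 grid 0 (j + 1) * (MN grid 0 j).1, get2 grid 0 (j + 1) * (MN grid 0 j).2)
  | i + 1, j + 1 =>
    if get2 grid (i + 1) (j + 1) > 0 then
      (max (MN grid i (j + 1)).1 (MN grid (i + 1) j).1 * get2 grid (i + 1) (j + 1),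
       min (MN grid i (j + 1)).2 (MN grid (i + 1) j).2 * get2 grid (i + 1) (j + 1))
    else
      (min (MN grid i (j + 1)).2 (MN grid (i + 1) j).2 * get2 grid (i + 1) (j + 1),
       max (MN grid i (j + 1)).1 (MN grid (i + 1) j).1 * get2 grid (i + 1) (j + 1))

theorem MN_col_eq (grid : List (List Int)) : ∀ i, (MN grid i 0).1 = (MN grid i 0).2 := by
  intro i; induction i with
  | zero => simp [MN]
  | succ i ih => simp [MN, ih]

theorem MN_row_eq (grid : List (List Int)) : ∀ j, (MN grid 0 j).1 = (MN grid 0 j).2 := by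
  intro j; induction j with
  | zero => simp [MN]
  | succ j ih => simp [MN, ih]

theorem MN_le (grid : List (List Int)) : ∀ i j, (MN grid i j).2 ≤ (MN grid i j).1
  | 0, 0 => by simp [MN]
  | i + 1, 0 => by
      simp only [MN]
      exact le_of_eq (by rw [MN_col_eq])
  | 0, j + 1 => by
      simp only [MN]
      exact le_of_eq (by rw [MN_row_eq])
  | i + 1, j + 1 => by
      have ih1 := MN_le grid i (j + 1)
      have ih2 := MN_le grid (i + 1) j
      simp only [MN]
      split_ifs with hg
      · exact mul_le_mul_of_nonneg_right
          (le_trans (le_trans (min_le_left _ _) ih1) (le_max_left _ _)) hg.le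
      · exact mul_le_mul_of_nonpos_right
          (le_trans (le_trans (min_le_left _ _) ih1) (le_max_left _ _)) (not_lt.mp hg)

theorem sup4 (g Mu Nu Ml Nl : Int) (hu : Nu ≤ Mu) (hl : Nl ≤ Ml) :
    max (max (max (g * Mu) (g * Nu)) (g * Ml)) (g * Nl) =
      if g > 0 then max Mu Ml * g else min Nu Nl * g := by
  rcases lt_or_ge 0 g with hg | hg <;>
    simp only [max_def, min_def] <;> split_ifs <;> nlinarith

theorem inf4 (g Mu Nu Ml Nl : Int) (hu : Nu ≤ Mu) (hl : Nl ≤ Ml) :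
    min (min (min (g * Mu) (g * Nu)) (g * Ml)) (g * Nl) =
      if g > 0 then min Nu Nl * g else max Mu Ml * g := by
  rcases lt_or_ge 0 g with hg | hg <;>
    simp only [max_def, min_def] <;> split_ifs <;> nlinarith

-- ---------- A side: table shape and cell access ----------

def Shape (grid : List (List Int)) (t : List (List Int)) : Prop :=
  t.length = grid.length ∧ ∀ r, r < grid.length → (t.getD r []).length = (grid.getD 0 []).length

theorem shape_rep (grid : List (List Int)) :
    Shape grid (List.replicate grid.length (List.replicate (grid.getD 0 []).length (0 : Int))) := by
  constructor
  · simp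
  · intro r hr
    simp [List.getD_eq_getElem?_getD, hr]

theorem getD_set' {α : Type} (l : List α) (i r : Nat) (a d : α) :
    (l.set i a).getD r d = if i = r ∧ i < l.length then a else l.getD r d := by
  simp only [List.getD_eq_getElem?_getD, List.getElem?_set]
  by_cases h1 : i = r
  · subst h1
    by_cases h2 : i < l.length
    · simp [h2]
    · simp [h2]
  · simp [h1]

theorem shape_set2 (grid : List (List Int)) (t : List (List Int)) (i j : Nat) (v : Int)
    (h : Shape grid t) : Shape grid (set2 t i j v) := by
  obtain ⟨h1, h2⟩ := h
  constructor
  · simp [set2, h1]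
  · intro r hr
    unfold set2
    rw [getD_set']
    split_ifs with h3
    · obtain ⟨rfl, -⟩ := h3
      rw [List.length_set]
      exact h2 i hr
    · exact h2 r hr

theorem get2_set2_self (t : List (List Int)) (i j : Nat) (v : Int)
    (hi : i < t.length) (hj : j < (t.getD i []).length) :
    get2 (set2 t i j v) i j = v := by
  unfold get2 set2
  rw [getD_set', if_pos ⟨rfl, hi⟩, getD_set', if_pos ⟨rfl, hj⟩]

theorem get2_set2_ne (t : List (List Int)) (i j r c : Nat) (v : Int)
    (h : r ≠ i ∨ c ≠ j) : get2 (set2 t i j v) r c = get2 t r c := by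
  unfold get2 set2
  rw [getD_set']
  split_ifs with h1
  · obtain ⟨rfl, -⟩ := h1
    rcases h with h | h
    · exact absurd rfl h
    · rw [getD_set', if_neg (by rintro ⟨rfl, -⟩; exact h rfl)]
  · rfl

-- "the cells selected by S hold the DP values"
def Fill (grid : List (List Int)) (P Q : List (List Int)) (S : Nat → Nat → Prop) : Prop :=
  ∀ r c, r < grid.length → c < (grid.getD 0 []).length → S r c →
    get2 P r c = (MN grid r c).1 ∧ get2 Q r c = (MN grid r c).2

theorem Fill_mono (grid : List (List Int)) (P Q : List (List Int)) (S S' : Nat → Nat → Prop)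
    (h : ∀ r c, r < grid.length → c < (grid.getD 0 []).length → S' r c → S r c)
    (hf : Fill grid P Q S) : Fill grid P Q S' := by
  intro r c hr hc hs; exact hf r c hr hc (h r c hr hc hs)

theorem phase1 (grid : List (List Int)) (hn : 0 < (grid.getD 0 []).length)
    (s : List (List Int) × List (List Int))
    (hs1 : Shape grid s.1) (hs2 : Shape grid s.2)
    (h0 : get2 s.1 0 0 = (MN grid 0 0).1 ∧ get2 s.2 0 0 = (MN grid 0 0).2) :
    ∀ k, k < grid.length →
      Shape grid ((List.range' 1 k).foldl (stepCol grid) s).1 ∧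
      Shape grid ((List.range' 1 k).foldl (stepCol grid) s).2 ∧
      ∀ r, r ≤ k → get2 ((List.range' 1 k).foldl (stepCol grid) s).1 r 0 = (MN grid r 0).1 ∧
                    get2 ((List.range' 1 k).foldl (stepCol grid) s).2 r 0 = (MN grid r 0).2 := by
  intro k
  induction k with
  | zero =>
    intro _
    refine ⟨hs1, hs2, ?_⟩
    intro r hr
    interval_cases r
    exact h0
  | succ k ih =>
    intro hk
    obtain ⟨ih1, ih2, ihf⟩ := ih (Nat.lt_of_succ_lt hk)
    rw [List.range'_concat, List.foldl_append, List.foldl_cons, List.foldl_nil]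
    set P := (List.range' 1 k).foldl (stepCol grid) s with hP
    have hv : stepCol grid P (1 + 1 * k) =
        (set2 P.1 (k + 1) 0 (get2 grid (k + 1) 0 * get2 P.1 k 0),
         set2 P.2 (k + 1) 0 (get2 grid (k + 1) 0 * get2 P.2 k 0)) := by
      unfold stepCol
      norm_num [Nat.add_comm]
    rw [hv]
    refine ⟨shape_set2 _ _ _ _ _ ih1, shape_set2 _ _ _ _ _ ih2, ?_⟩
    intro r hr
    rcases Nat.lt_or_ge r (k + 1) with hlt | hge
    · have hne : r ≠ k + 1 ∨ (0 : Nat) ≠ 0 := Or.inl (by omega)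
      rw [get2_set2_ne _ _ _ _ _ _ hne, get2_set2_ne _ _ _ _ _ _ hne]
      exact ihf r (by omega)
    · have hr1 : r = k + 1 := by omega
      subst hr1
      obtain ⟨hfa, hfb⟩ := ihf k (le_refl k)
      rw [get2_set2_self _ _ _ _ (by rw [ih1.1]; omega)
            (by rw [ih1.2 (k+1) (by omega)]; omega),
          get2_set2_self _ _ _ _ (by rw [ih2.1]; omega)
            (by rw [ih2.2 (k+1) (by omega)]; omega)]
      rw [hfa, hfb]
      simp [MN]

theorem phase2 (grid : List (List Int)) (hm : 0 < grid.length)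
    (s : List (List Int) × List (List Int))
    (hs1 : Shape grid s.1) (hs2 : Shape grid s.2)
    (hcol : ∀ r, r < grid.length → get2 s.1 r 0 = (MN grid r 0).1 ∧ get2 s.2 r 0 = (MN grid r 0).2) :
    ∀ k, k < (grid.getD 0 []).length →
      Shape grid ((List.range' 1 k).foldl (stepRow grid) s).1 ∧
      Shape grid ((List.range' 1 k).foldl (stepRow grid) s).2 ∧
      (∀ r, r < grid.length → get2 ((List.range' 1 k).foldl (stepRow grid) s).1 r 0 = (MN grid r 0).1 ∧
                    get2 ((List.range' 1 k).foldl (stepRow grid) s).2 r 0 = (MN grid r 0).2) ∧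
      ∀ c, c ≤ k → get2 ((List.range' 1 k).foldl (stepRow grid) s).1 0 c = (MN grid 0 c).1 ∧
                    get2 ((List.range' 1 k).foldl (stepRow grid) s).2 0 c = (MN grid 0 c).2 := by
  intro k
  induction k with
  | zero =>
    intro _
    refine ⟨hs1, hs2, hcol, ?_⟩
    intro c hc
    interval_cases c
    exact hcol 0 hm
  | succ k ih =>
    intro hk
    obtain ⟨ih1, ih2, ihcol, ihf⟩ := ih (Nat.lt_of_succ_lt hk)
    rw [List.range'_concat, List.foldl_append, List.foldl_cons, List.foldl_nil]
    set P := (List.range' 1 k).foldl (stepRow grid) s with hP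
    have hv : stepRow grid P (1 + 1 * k) =
        (set2 P.1 0 (k + 1) (get2 grid 0 (k + 1) * get2 P.1 0 k),
         set2 P.2 0 (k + 1) (get2 grid 0 (k + 1) * get2 P.2 0 k)) := by
      unfold stepRow
      norm_num [Nat.add_comm]
    rw [hv]
    refine ⟨shape_set2 _ _ _ _ _ ih1, shape_set2 _ _ _ _ _ ih2, ?_, ?_⟩
    · intro r hr
      rcases Nat.eq_zero_or_pos r with rfl | hrpos
      · have hne : (0 : Nat) ≠ 0 ∨ (0 : Nat) ≠ k + 1 := Or.inr (by omega)
        rw [get2_set2_ne _ _ _ _ _ _ hne, get2_set2_ne _ _ _ _ _ _ hne]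
        exact ihcol 0 hr
      · have hne : r ≠ 0 ∨ (0 : Nat) ≠ k + 1 := Or.inl (by omega)
        rw [get2_set2_ne _ _ _ _ _ _ hne, get2_set2_ne _ _ _ _ _ _ hne]
        exact ihcol r hr
    · intro c hc
      rcases Nat.lt_or_ge c (k + 1) with hlt | hge
      · have hne : (0 : Nat) ≠ 0 ∨ c ≠ k + 1 := Or.inr (by omega)
        rw [get2_set2_ne _ _ _ _ _ _ hne, get2_set2_ne _ _ _ _ _ _ hne]
        exact ihf c (by omega)
      · have hc1 : c = k + 1 := by omega
        subst hc1
        obtain ⟨hfa, hfb⟩ := ihf k (le_refl k)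
        rw [get2_set2_self _ _ _ _ (by rw [ih1.1]; omega)
              (by rw [ih1.2 0 hm]; omega),
            get2_set2_self _ _ _ _ (by rw [ih2.1]; omega)
              (by rw [ih2.2 0 hm]; omega)]
        rw [hfa, hfb]
        simp [MN]

theorem phase3_inner (grid : List (List Int)) (i : Nat) (hi : 0 < i) (him : i < grid.length)
    (s : List (List Int) × List (List Int))
    (hs1 : Shape grid s.1) (hs2 : Shape grid s.2)
    (hf : Fill grid s.1 s.2 (fun r c => r = 0 ∨ c = 0 ∨ r < i)) :
    ∀ k, k < (grid.getD 0 []).length →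
      Shape grid ((List.range' 1 k).foldl (stepInner grid i) s).1 ∧
      Shape grid ((List.range' 1 k).foldl (stepInner grid i) s).2 ∧
      Fill grid ((List.range' 1 k).foldl (stepInner grid i) s).1
        ((List.range' 1 k).foldl (stepInner grid i) s).2
        (fun r c => r = 0 ∨ c = 0 ∨ r < i ∨ (r = i ∧ c ≤ k)) := by
  intro k
  induction k with
  | zero =>
    intro _
    exact ⟨hs1, hs2, Fill_mono _ _ _ _ _ (fun r c _ _ hS => by omega) hf⟩
  | succ k ih =>
    intro hk
    obtain ⟨ih1, ih2, ihf⟩ := ih (Nat.lt_of_succ_lt hk)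
    rw [List.range'_concat, List.foldl_append, List.foldl_cons, List.foldl_nil,
      show 1 + 1 * k = k + 1 by omega]
    set P := (List.range' 1 k).foldl (stepInner grid i) s with hP
    obtain ⟨i', rfl⟩ : ∃ i', i = i' + 1 := ⟨i - 1, by omega⟩
    have hu := ihf i' (k + 1) (by omega) hk (Or.inr (Or.inr (Or.inl (Nat.lt_succ_self i'))))
    have hl := ihf (i' + 1) k (by omega) (by omega)
      (Or.inr (Or.inr (Or.inr ⟨rfl, le_refl k⟩)))
    have main : Fill grid
        (set2 P.1 (i' + 1) (k + 1)
          (if get2 grid (i' + 1) (k + 1) > 0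
            then max (get2 P.1 i' (k + 1)) (get2 P.1 (i' + 1) k) * get2 grid (i' + 1) (k + 1)
            else min (get2 P.2 i' (k + 1)) (get2 P.2 (i' + 1) k) * get2 grid (i' + 1) (k + 1)))
        (set2 P.2 (i' + 1) (k + 1)
          (if get2 grid (i' + 1) (k + 1) > 0
            then min (get2 P.2 i' (k + 1)) (get2 P.2 (i' + 1) k) * get2 grid (i' + 1) (k + 1)
            else max (get2 P.1 i' (k + 1)) (get2 P.1 (i' + 1) k) * get2 grid (i' + 1) (k + 1)))
        (fun r c => r = 0 ∨ c = 0 ∨ r < i' + 1 ∨ (r = i' + 1 ∧ c ≤ k + 1)) := by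
      intro r c hr hc hS
      by_cases hrc : r = i' + 1 ∧ c = k + 1
      · obtain ⟨rfl, rfl⟩ := hrc
        rw [get2_set2_self _ _ _ _ (by rw [ih1.1]; omega) (by rw [ih1.2 (i' + 1) hr]; omega),
            get2_set2_self _ _ _ _ (by rw [ih2.1]; omega) (by rw [ih2.2 (i' + 1) hr]; omega)]
        rw [hu.1, hu.2, hl.1, hl.2]
        by_cases hg : get2 grid (i' + 1) (k + 1) > 0
        · simp only [if_pos hg]
          constructor <;> simp [MN, hg]
        · simp only [if_neg hg]
          constructor <;> simp [MN, hg]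
      · have hne : r ≠ i' + 1 ∨ c ≠ k + 1 := by omega
        rw [get2_set2_ne _ _ _ _ _ _ hne, get2_set2_ne _ _ _ _ _ _ hne]
        exact ihf r c hr hc (by omega)
    unfold stepInner
    split_ifs with hg
    · exact ⟨shape_set2 _ _ _ _ _ ih1, shape_set2 _ _ _ _ _ ih2, by
        have := main
        simp only [if_pos hg] at this
        simpa [Nat.add_sub_cancel] using this⟩
    · exact ⟨shape_set2 _ _ _ _ _ ih1, shape_set2 _ _ _ _ _ ih2, by
        have := main
        simp only [if_neg hg] at this
        simpa [Nat.add_sub_cancel] using this⟩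

theorem phase3 (grid : List (List Int)) (hn : 0 < (grid.getD 0 []).length)
    (s : List (List Int) × List (List Int))
    (hs1 : Shape grid s.1) (hs2 : Shape grid s.2)
    (hf : Fill grid s.1 s.2 (fun r c => r = 0 ∨ c = 0)) :
    ∀ k, k < grid.length →
      Shape grid ((List.range' 1 k).foldl (stepOuter grid) s).1 ∧
      Shape grid ((List.range' 1 k).foldl (stepOuter grid) s).2 ∧
      Fill grid ((List.range' 1 k).foldl (stepOuter grid) s).1
        ((List.range' 1 k).foldl (stepOuter grid) s).2
        (fun r c => r = 0 ∨ c = 0 ∨ r ≤ k) := by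
  intro k
  induction k with
  | zero =>
    intro _
    exact ⟨hs1, hs2, Fill_mono _ _ _ _ _ (fun r c _ _ hS => by omega) hf⟩
  | succ k ih =>
    intro hk
    obtain ⟨ih1, ih2, ihf⟩ := ih (Nat.lt_of_succ_lt hk)
    rw [List.range'_concat, List.foldl_append, List.foldl_cons, List.foldl_nil,
      show 1 + 1 * k = k + 1 by omega]
    set P := (List.range' 1 k).foldl (stepOuter grid) s with hP
    have hin := phase3_inner grid (k + 1) (Nat.succ_pos k) hk P ih1 ih2
      (Fill_mono _ _ _ _ _ (fun r c _ _ hS => by omega) ihf)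
      ((grid.getD 0 []).length - 1) (by omega)
    unfold stepOuter
    exact ⟨hin.1, hin.2.1, Fill_mono _ _ _ _ _ (fun r c hr hc hS => by omega) hin.2.2⟩

theorem A_eq (grid : List (List Int)) (hm : 0 < grid.length)
    (hn : 0 < (grid.getD 0 []).length) :
    solution_1078_4 grid =
      if (MN grid (grid.length - 1) ((grid.getD 0 []).length - 1)).1 ≥ 0
      then PySem.Int.mod (MN grid (grid.length - 1) ((grid.getD 0 []).length - 1)).1 (10 ^ 9 + 7)
      else -1 := by
  unfold solution_1078_4
  dsimp only
  set z := List.replicate grid.length (List.replicate (grid.getD 0 []).length (0 : Int)) with hz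
  set T0 := set2 z 0 0 (get2 grid 0 0) with hT0def
  set s1 := (List.range' 1 (grid.length - 1)).foldl (stepCol grid) (T0, T0) with hs1def
  set s2 := (List.range' 1 ((grid.getD 0 []).length - 1)).foldl (stepRow grid) s1 with hs2def
  set s3 := (List.range' 1 (grid.length - 1)).foldl (stepOuter grid) s2 with hs3def
  have hzs : Shape grid z := shape_rep grid
  have hT0 : Shape grid T0 := shape_set2 _ _ _ _ _ hzs
  have h00 : get2 T0 0 0 = (MN grid 0 0).1 ∧ get2 T0 0 0 = (MN grid 0 0).2 := by
    have := get2_set2_self z 0 0 (get2 grid 0 0) (by rw [hzs.1]; omega) (by rw [hzs.2 0 hm]; omega)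
    rw [← hT0def] at this
    rw [this]
    simp [MN]
  have p1 := phase1 grid hn (T0, T0) hT0 hT0 h00 (grid.length - 1) (by omega)
  rw [← hs1def] at p1
  have p2 := phase2 grid hm s1 p1.1 p1.2.1 (fun r hr => p1.2.2 r (by omega))
    ((grid.getD 0 []).length - 1) (by omega)
  rw [← hs2def] at p2
  have hf2 : Fill grid s2.1 s2.2 (fun r c => r = 0 ∨ c = 0) := by
    intro r c hr hc hS
    rcases hS with rfl | rfl
    · exact p2.2.2.2 c (by omega)
    · exact p2.2.2.1 r hr
  have p3 := phase3 grid hn s2 p2.1 p2.2.1 hf2 (grid.length - 1) (by omega)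
  rw [← hs3def] at p3
  have hfin := p3.2.2 (grid.length - 1) ((grid.getD 0 []).length - 1)
    (by omega) (by omega) (Or.inr (Or.inr (le_refl _)))
  have hlen : s3.1.length = grid.length := p3.1.1
  have hrowlen : (s3.1.getD (grid.length - 1) []).length = (grid.getD 0 []).length :=
    p3.1.2 (grid.length - 1) (by omega)
  have hget : (PySem.List.pyGet? ((PySem.List.pyGet? s3.1 (-1)).getD []) (-1)).getD 0
      = get2 s3.1 (grid.length - 1) ((grid.getD 0 []).length - 1) := by
    have hrow : (PySem.List.pyGet? s3.1 (-1)).getD [] = s3.1.getD (grid.length - 1) [] := by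
      rw [PySem.List.pyGet?_neg_one, List.getLast?_eq_getElem?, hlen, List.getD_eq_getElem?_getD]
    rw [hrow, PySem.List.pyGet?_neg_one, List.getLast?_eq_getElem?, hrowlen]
    simp [get2, List.getD_eq_getElem?_getD]
  rw [hget, hfin.1]

-- ---------- B side: the wavefront dict holds the DP values of its diagonal ----------

theorem maxD_cons (x : Int) (l : List Int) :
    (PySem.List.max? (x :: l) (fun y => y)).getD 0 = l.foldl max x := by
  rw [PySem.List.max?_id_cons]; rfl

theorem minD_cons (x : Int) (l : List Int) :
    (PySem.List.min? (x :: l) (fun y => y)).getD 0 = l.foldl min x := by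
  rw [PySem.List.min?_id_cons]; rfl

-- invariant of the rolling dict after diagonal d: key j ↦ MN (d-j) j on the diagonal, nothing else
def DInv (grid : List (List Int)) (m n d : Nat) (dict : PySem.Dict Int (Int × Int)) : Prop :=
  (∀ j : Nat, d + 1 - m ≤ j → j ≤ min d (n - 1) →
      dict.get? ((j : Nat) : Int) = some (MN grid (d - j) j)) ∧
  (∀ k : Int, (k < ((d + 1 - m : Nat) : Int) ∨ ((min d (n - 1) : Nat) : Int) < k) →
      dict.get? k = none)

theorem cell_val (grid : List (List Int)) (m n d j : Nat)
    (hm : m = grid.length) (hn : n = (grid.getD 0 []).length)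
    (hm0 : 0 < m) (hn0 : 0 < n)
    (hjlo : d + 1 - m ≤ j) (hjhi : j ≤ min d (n - 1))
    (prev : PySem.Dict Int (Int × Int))
    (hprev : if d = 0 then prev = PySem.Dict.empty else DInv grid m n (d - 1) prev)
    (D : PySem.Dict Int (Int × Int)) :
    bCell grid prev d D j = PySem.Dict.insert D ((j : Nat) : Int) (MN grid (d - j) j) := by
  unfold bCell
  rcases Nat.eq_zero_or_pos d with rfl | hd0
  · rw [if_pos rfl] at hprev
    have hj0 : j = 0 := by omega
    subst hj0
    subst hprev
    simp [PySem.Dict.get?_empty, MN]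
  · rw [if_neg (by omega)] at hprev
    obtain ⟨hsome, hnone⟩ := hprev
    obtain ⟨d', rfl⟩ : ∃ d', d = d' + 1 := ⟨d - 1, by omega⟩
    simp only [Nat.add_sub_cancel] at hsome hnone
    rcases Nat.eq_zero_or_pos j with rfl | hj1
    · -- first column: only the top neighbour exists
      have hL : prev.get? (((0 : Nat) : Int) - 1) = none := by
        refine hnone _ (Or.inl ?_)
        push_cast
        omega
      have hU : prev.get? ((0 : Nat) : Int) = some (MN grid d' 0) := by
        have h := hsome 0 (by omega) (by omega)
        simpa using h
      simp only [Nat.cast_zero] at hL hU ⊢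
      rw [show ((0 : Int) - 1) = (-1 : Int) by ring] at hL
      simp only [List.flatMap_cons, List.flatMap_nil, zero_sub, hL, hU, List.nil_append,
        List.append_nil, List.isEmpty_cons, Bool.false_eq_true, if_false, maxD_cons, minD_cons,
        List.foldl_cons, List.foldl_nil]
      have hq := MN_col_eq grid d'
      rw [show (MN grid (d' + 1 - 0) 0) = MN grid (d' + 1) 0 by norm_num,
        show (MN grid (d' + 1) 0) =
          (get2 grid (d' + 1) 0 * (MN grid d' 0).1, get2 grid (d' + 1) 0 * (MN grid d' 0).2)
          from by simp [MN], hq]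
      rw [show (d' + 1 - 0) = d' + 1 by omega]
      simp [mul_comm]
    · rcases Nat.lt_or_ge d' (j) with hij | hij
      · -- top row cell (j = d'+1): only the left neighbour exists
        have hjd : j = d' + 1 := by omega
        subst hjd
        have hU : prev.get? (((d' + 1 : Nat) : Int)) = none := by
          refine hnone _ (Or.inr ?_)
          have : min d' (n - 1) ≤ d' := min_le_left _ _
          push_cast
          omega
        have hL : prev.get? (((d' + 1 : Nat) : Int) - 1) = some (MN grid 0 d') := by
          have h := hsome d' (by omega) (by omega)
          rw [show ((d' + 1 : Nat) : Int) - 1 = ((d' : Nat) : Int) by push_cast; ring]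
          simpa using h
        simp only [List.flatMap_cons, List.flatMap_nil, hL, hU, List.append_nil,
          List.isEmpty_cons, Bool.false_eq_true, if_false, maxD_cons, minD_cons,
          List.foldl_cons, List.foldl_nil]
        have hq := MN_row_eq grid d'
        rw [show (d' + 1 - (d' + 1)) = 0 by omega,
          show (MN grid 0 (d' + 1)) =
            (get2 grid 0 (d' + 1) * (MN grid 0 d').1, get2 grid 0 (d' + 1) * (MN grid 0 d').2)
            from by simp [MN], hq]
        simp [mul_comm]
      · -- interior cell: both neighbours exist
        obtain ⟨j', rfl⟩ : ∃ j', j = j' + 1 := ⟨j - 1, by omega⟩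
        obtain ⟨i', hi'⟩ : ∃ i', d' + 1 - (j' + 1) = i' + 1 := ⟨d' - j' - 1, by omega⟩
        have hL : prev.get? (((j' + 1 : Nat) : Int) - 1) =
            some (MN grid (i' + 1) j') := by
          have h := hsome j' (by omega) (by omega)
          rw [show ((j' + 1 : Nat) : Int) - 1 = ((j' : Nat) : Int) by push_cast; ring]
          rw [show d' - j' = i' + 1 by omega] at h
          exact h
        have hU : prev.get? (((j' + 1 : Nat) : Int)) = some (MN grid i' (j' + 1)) := by
          have h := hsome (j' + 1) (by omega) (by omega)
          rw [show d' - (j' + 1) = i' by omega] at h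
          exact h
        simp only [List.flatMap_cons, List.flatMap_nil, hL, hU, List.append_nil,
          List.cons_append, List.nil_append, List.isEmpty_cons, Bool.false_eq_true, if_false,
          maxD_cons, minD_cons, List.foldl_cons, List.foldl_nil]
        have hu := MN_le grid (i' + 1) j'
        have hl := MN_le grid i' (j' + 1)
        set g := get2 grid (d' + 1 - (j' + 1)) (j' + 1) with hg
        have hsup := sup4 g (MN grid (i' + 1) j').1 (MN grid (i' + 1) j').2
          (MN grid i' (j' + 1)).1 (MN grid i' (j' + 1)).2 hu hl
        have hinf := inf4 g (MN grid (i' + 1) j').1 (MN grid (i' + 1) j').2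
          (MN grid i' (j' + 1)).1 (MN grid i' (j' + 1)).2 hu hl
        rw [show max (max (max (g * (MN grid (i' + 1) j').1) (g * (MN grid (i' + 1) j').2))
              (g * (MN grid i' (j' + 1)).1)) (g * (MN grid i' (j' + 1)).2) =
            if g > 0 then max (MN grid (i' + 1) j').1 (MN grid i' (j' + 1)).1 * g
            else min (MN grid (i' + 1) j').2 (MN grid i' (j' + 1)).2 * g from hsup,
          show min (min (min (g * (MN grid (i' + 1) j').1) (g * (MN grid (i' + 1) j').2))
              (g * (MN grid i' (j' + 1)).1)) (g * (MN grid i' (j' + 1)).2) =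
            if g > 0 then min (MN grid (i' + 1) j').2 (MN grid i' (j' + 1)).2 * g
            else max (MN grid (i' + 1) j').1 (MN grid i' (j' + 1)).1 * g from hinf]
        rw [hi']
        have hgeq : g = get2 grid (i' + 1) (j' + 1) := by rw [hg, hi']
        rw [hgeq]
        by_cases hgp : get2 grid (i' + 1) (j' + 1) > 0
        · simp [MN, hgp, max_comm, min_comm]
        · simp [MN, hgp, max_comm, min_comm]

theorem diag_fold (grid : List (List Int)) (m n d : Nat)
    (hm : m = grid.length) (hn : n = (grid.getD 0 []).length)
    (hm0 : 0 < m) (hn0 : 0 < n)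
    (prev : PySem.Dict Int (Int × Int))
    (hprev : if d = 0 then prev = PySem.Dict.empty else DInv grid m n (d - 1) prev) :
    ∀ c, c ≤ min d (n - 1) + 1 - (d + 1 - m) →
      (∀ j : Nat, d + 1 - m ≤ j → j < (d + 1 - m) + c →
        ((List.range' (d + 1 - m) c).foldl (bCell grid prev d) PySem.Dict.empty).get?
          ((j : Nat) : Int) = some (MN grid (d - j) j)) ∧
      (∀ k : Int, (k < ((d + 1 - m : Nat) : Int) ∨ ((((d + 1 - m) + c : Nat)) : Int) ≤ k) →
        ((List.range' (d + 1 - m) c).foldl (bCell grid prev d) PySem.Dict.empty).get? k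
          = none) := by
  intro c
  induction c with
  | zero =>
    intro _
    constructor
    · intro j h1 h2; omega
    · intro k _; simp [PySem.Dict.get?_empty]
  | succ c ih =>
    intro hc
    obtain ⟨ih1, ih2⟩ := ih (by omega)
    rw [List.range'_concat, List.foldl_append, List.foldl_cons, List.foldl_nil,
      show (d + 1 - m) + 1 * c = (d + 1 - m) + c by omega]
    rw [cell_val grid m n d ((d + 1 - m) + c) hm hn hm0 hn0 (by omega) (by omega) prev hprev]
    constructor
    · intro j h1 h2
      by_cases hj : j = (d + 1 - m) + c
      · subst hj
        rw [PySem.Dict.get?_insert_self]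
      · rw [PySem.Dict.get?_insert_of_ne _ _ (by exact_mod_cast hj)]
        exact ih1 j h1 (by omega)
    · intro k hk
      have hkne : k ≠ (((d + 1 - m) + c : Nat) : Int) := by
        rcases hk with h | h
        · push_cast at h ⊢; omega
        · push_cast at h ⊢; omega
      rw [PySem.Dict.get?_insert_of_ne _ _ hkne]
      refine ih2 k ?_
      rcases hk with h | h
      · exact Or.inl h
      · right; push_cast at h ⊢; omega

theorem bDiag_inv (grid : List (List Int)) (m n d : Nat)
    (hm : m = grid.length) (hn : n = (grid.getD 0 []).length)
    (hm0 : 0 < m) (hn0 : 0 < n) (hd : d < m + n - 1)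
    (prev : PySem.Dict Int (Int × Int))
    (hprev : if d = 0 then prev = PySem.Dict.empty else DInv grid m n (d - 1) prev) :
    DInv grid m n d (bDiag grid m n prev d) := by
  have hlohi : d + 1 - m ≤ min d (n - 1) := by omega
  have h := diag_fold grid m n d hm hn hm0 hn0 prev hprev
    (min d (n - 1) + 1 - (d + 1 - m)) le_rfl
  unfold bDiag DInv
  constructor
  · intro j h1 h2
    exact h.1 j h1 (by omega)
  · intro k hk
    refine h.2 k ?_
    rcases hk with h' | h'
    · exact Or.inl h'
    · right
      have : (d + 1 - m) + (min d (n - 1) + 1 - (d + 1 - m)) = min d (n - 1) + 1 := by omega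
      rw [this]
      push_cast at h' ⊢
      omega

theorem outer_fold (grid : List (List Int)) (m n : Nat)
    (hm : m = grid.length) (hn : n = (grid.getD 0 []).length)
    (hm0 : 0 < m) (hn0 : 0 < n) :
    ∀ t, t ≤ m + n - 1 → 1 ≤ t →
      DInv grid m n (t - 1)
        ((List.range t).foldl (bDiag grid m n) PySem.Dict.empty) := by
  intro t
  induction t with
  | zero => intro _ h; omega
  | succ t ih =>
    intro ht _
    rw [List.range_succ, List.foldl_append, List.foldl_cons, List.foldl_nil,
      Nat.add_sub_cancel]
    rcases Nat.eq_zero_or_pos t with rfl | ht1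
    · simp only [List.range_zero, List.foldl_nil]
      exact bDiag_inv grid m n 0 hm hn hm0 hn0 (by omega) _ (by rw [if_pos rfl])
    · have hinv := ih (by omega) ht1
      exact bDiag_inv grid m n t hm hn hm0 hn0 (by omega) _
        (by rw [if_neg (by omega)]; simpa using hinv)

theorem B_eq (grid : List (List Int)) (hm : 0 < grid.length)
    (hn : 0 < (grid.getD 0 []).length) :
    solution_1078_4_alt grid =
      if (MN grid (grid.length - 1) ((grid.getD 0 []).length - 1)).1 ≥ 0
      then PySem.Int.mod (MN grid (grid.length - 1) ((grid.getD 0 []).length - 1)).1 (10 ^ 9 + 7)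
      else -1 := by
  unfold solution_1078_4_alt
  dsimp only
  set m := grid.length with hmdef
  set n := (grid.getD 0 []).length with hndef
  have h := outer_fold grid m n rfl rfl hm hn (m + n - 1) le_rfl (by omega)
  have hget := h.1 (n - 1) (by omega) (by omega)
  rw [show ((n : Nat) : Int) - 1 = (((n - 1 : Nat)) : Int) by push_cast [hn]; omega, hget]
  rw [show (m + n - 1 - 1) - (n - 1) = m - 1 by omega]
  simp

-- ===== VERDICT (by name: the statement is the Claim_ definition above) =====
theorem solution_1078_4_spec : Claim_equal_solution_1078_4 := by
  intro grid _hdom hpre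
  obtain ⟨hne, hn0, _hrows⟩ := hpre
  have hm : 0 < grid.length := List.length_pos_iff.mpr hne
  have hn : 0 < (grid.getD 0 []).length := Nat.pos_of_ne_zero hn0
  unfold Spec_solution_1078_4
  rw [A_eq grid hm hn, B_eq grid hm hn]
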